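-- pv_equiv track=rewrite | github.com/webis-de/ECIR-23 | src/main/python/parametrized_bootstrapping_model.py | select_max_cluster
-- ===== SOURCE A (Python) =====
-- def select_max_cluster(clusters):
--     max_elements = max([len(i) for i in clusters.values()])
--
--     ret = {}
--     for k, v in clusters.items():
--         if len(v) < max_elements:
--             continue
--         ret[k] = v
--
--     return ret
-- ===== SOURCE B (Python) =====
-- def select_max_cluster(clusters):
--     buckets = {}
--     for k, v in clusters.items():
--         buckets.setdefault(len(v), {})[k] = v
--     return buckets[max(buckets)]
-- ===== Notes on version B (the rewrite author's own statement) =====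
-- stated objective: alternative
-- what changed: Instead of computing the max size first and then filtering in a second pass, B groups the clusters in one pass into a table keyed by size and returns the bucket under the largest size key.
-- outside the precondition, e.g. on select_max_cluster({}): A raises ValueError, B raises ValueError
import Mathlib
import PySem

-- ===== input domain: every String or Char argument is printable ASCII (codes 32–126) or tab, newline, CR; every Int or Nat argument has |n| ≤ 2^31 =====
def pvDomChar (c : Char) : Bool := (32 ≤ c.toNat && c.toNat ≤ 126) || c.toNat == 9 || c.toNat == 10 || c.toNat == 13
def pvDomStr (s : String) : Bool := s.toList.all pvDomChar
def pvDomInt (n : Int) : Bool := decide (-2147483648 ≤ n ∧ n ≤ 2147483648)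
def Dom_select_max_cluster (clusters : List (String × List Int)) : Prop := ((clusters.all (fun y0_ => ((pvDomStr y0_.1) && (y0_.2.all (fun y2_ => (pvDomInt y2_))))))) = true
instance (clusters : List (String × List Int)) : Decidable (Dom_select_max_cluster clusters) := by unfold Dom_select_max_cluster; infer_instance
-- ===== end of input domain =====

-- B replaces A's max-then-filter two-pass with a one-pass grouping by size followed by a lookup
-- under the largest size key ('alternative'); return values agree, proved below.

-- ===== PORT A =====
def select_max_cluster (clusters : List (String × List Int)) : List (String × List Int) :=
  let max_elements : Int :=
    (PySem.List.max? (clusters.map (fun kv => (kv.2.length : Int))) (fun x => x)).getD 0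
  let ret : PySem.Dict String (List Int) :=
    clusters.foldl (fun ret kv =>
      if (kv.2.length : Int) < max_elements then ret
      else ret.insert kv.1 kv.2) PySem.Dict.empty
  ret.items

-- ===== PORT B =====
def select_max_cluster_alt (clusters : List (String × List Int)) : List (String × List Int) :=
  let buckets : PySem.Dict Int (PySem.Dict String (List Int)) :=
    clusters.foldl (fun b kv =>
      b.modify (kv.2.length : Int) PySem.Dict.empty (fun sub => sub.insert kv.1 kv.2))
      PySem.Dict.empty
  let maxKey : Int := (PySem.List.max? buckets.keys (fun x => x)).getD 0
  (buckets.getD maxKey PySem.Dict.empty).items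

-- ===== PRECONDITION & SPEC =====
-- Pre_ excludes only the empty dict, on which A's max([]) raises ValueError (B's max(buckets) raises too).
def Pre_select_max_cluster (clusters : List (String × List Int)) : Prop :=
  clusters ≠ []
instance (clusters : List (String × List Int)) : Decidable (Pre_select_max_cluster clusters) := by
  unfold Pre_select_max_cluster; infer_instance
def pvWitness_select_max_cluster : (List (String × List Int)) := [("a", [1, 2]), ("b", [3])]
def Spec_select_max_cluster (clusters : List (String × List Int)) (out : List (String × List Int)) : Prop := out = select_max_cluster_alt clusters
instance (clusters : List (String × List Int)) (out : List (String × List Int)) : Decidable (Spec_select_max_cluster clusters out) := by unfold Spec_select_max_cluster; infer_instance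

-- ===== CLAIM (what is proved, stated in full; the proofs are below) =====
def Claim_equal_select_max_cluster : Prop := ∀ (clusters : List (String × List Int)), Dom_select_max_cluster clusters → Pre_select_max_cluster clusters → Spec_select_max_cluster clusters (select_max_cluster clusters)

-- ===== LEMMAS AND PROOFS =====

-- B's grouping loop: the bucket under key c collects, in order, the entries whose length is c.
theorem pvB_bucket (l : List (String × List Int))
    (b : PySem.Dict Int (PySem.Dict String (List Int))) (c : Int) :
    (l.foldl (fun b kv =>
        b.modify (kv.2.length : Int) PySem.Dict.empty (fun sub => sub.insert kv.1 kv.2)) b).getD c PySem.Dict.empty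
      = (l.filter (fun kv => (kv.2.length : Int) == c)).foldl
          (fun sub kv => sub.insert kv.1 kv.2) (b.getD c PySem.Dict.empty) := by
  induction l generalizing b with
  | nil => rfl
  | cons x t ih =>
    simp only [List.foldl_cons, List.filter_cons]
    by_cases h : (x.2.length : Int) = c
    · simp [h, ih, PySem.Dict.getD_modify_self]
    · have : ((x.2.length : Int) == c) = false := by simp [h]
      simp [this, ih, PySem.Dict.getD_modify, Ne.symm h]

-- ===== VERDICT (by name: the statement is the Claim_ definition above) =====
theorem select_max_cluster_spec : Claim_equal_select_max_cluster := by
  intro clusters _ hne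
  unfold Spec_select_max_cluster select_max_cluster select_max_cluster_alt
  dsimp only
  -- the list of sizes is nonempty, so A's max is some m
  set lens := clusters.map (fun kv : String × List Int => (kv.2.length : Int)) with hlens
  have hlne : lens ≠ [] := by simpa [hlens] using hne
  obtain ⟨m, hm⟩ : ∃ m, PySem.List.max? lens (fun x => x) = some m := by
    cases h : PySem.List.max? lens (fun x => x) with
    | none => exact absurd ((PySem.List.max?_eq_none_iff _ _).mp h) hlne
    | some m => exact ⟨m, rfl⟩
  have hmmem : m ∈ lens := PySem.List.max?_mem hm
  have hmmax : ∀ y ∈ lens, y ≤ m := fun y hy => PySem.List.max?_isMax hm y hy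
  -- B's bucket keys are exactly the distinct sizes
  have hkeys : (clusters.foldl (fun b kv =>
      b.modify (kv.2.length : Int) PySem.Dict.empty (fun sub => sub.insert kv.1 kv.2))
      (PySem.Dict.empty : PySem.Dict Int (PySem.Dict String (List Int)))).keys
      = PySem.Set.ofList lens := by
    rw [PySem.Dict.keys_foldl_modify_key]
    simp [hlens, PySem.Set.update_nil_left]
  -- max over the bucket keys is the same m
  obtain ⟨k, hk⟩ : ∃ k, PySem.List.max? (PySem.Set.ofList lens) (fun x => x) = some k := by
    cases h : PySem.List.max? (PySem.Set.ofList lens) (fun x => x) with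
    | none =>
      exfalso
      have h0 : (PySem.Set.ofList lens : List Int) = [] := (PySem.List.max?_eq_none_iff _ _).mp h
      have hmem : m ∈ (PySem.Set.ofList lens : List Int) := (PySem.Set.mem_ofList _ _).mpr hmmem
      rw [h0] at hmem
      simp at hmem
    | some k => exact ⟨k, rfl⟩
  have hkm : k = m := by
    have h1 : k ∈ lens := (PySem.Set.mem_ofList _ _).mp (PySem.List.max?_mem hk)
    have h2 : m ≤ k := PySem.List.max?_isMax hk m ((PySem.Set.mem_ofList _ _).mpr hmmem)
    exact le_antisymm (hmmax k h1) h2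
  rw [hm, hkeys, hk, hkm]
  rw [Option.getD_some]
  rw [pvB_bucket, PySem.Dict.getD_empty]
  -- turn A's skip-or-insert loop into an insert loop over the filtered list
  have hfun : (fun (ret : PySem.Dict String (List Int)) kv =>
      if (kv.2.length : Int) < m then ret else ret.insert kv.1 kv.2)
      = (fun (ret : PySem.Dict String (List Int)) (kv : String × List Int) =>
          if ¬((kv.2.length : Int) < m) then ret.insert kv.1 kv.2 else ret) := by
    funext acc x; by_cases h : (x.2.length : Int) < m <;> simp [h]
  rw [hfun, PySem.List.foldl_ite_eq_foldl_filter]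
  -- both sides insert, in order, exactly the entries of maximal size
  rw [List.filter_congr (q := fun kv => (kv.2.length : Int) == m)
      (fun x hx => by
        have hle : (x.2.length : Int) ≤ m :=
          hmmax ((x.2.length : Int)) (by rw [hlens]; exact List.mem_map_of_mem hx)
        by_cases h : (x.2.length : Int) = m
        · simp [h]
        · have h1 : ¬ (m ≤ (x.2.length : Int)) := by omega
          simp [h1, h])]
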